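-- pv_equiv track=rewrite | github.com/TrueJacobG/python | COMPETITIVE PROGRAMMING/codeforces/133YetAnotherTetrisProblem.py | allOddOrEven
-- ===== SOURCE A (Python) =====
-- def allOddOrEven(a):
--     even = 0
--     odd = 0
--     for number in a:
--         if number % 2 == 0:
--             even += 1
--         else:
--             odd += 1
--     if even == len(a):
--         return True
--     if odd == len(a):
--         return True
--     return False
-- ===== SOURCE B (Python) =====
-- def allOddOrEven(a):
--     return all((x - y) % 2 == 0 for x, y in zip(a, a[1:]))
-- ===== Notes on version B (the rewrite author's own statement) =====
-- stated objective: idiomatic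
-- what changed: B checks that every pair of adjacent elements has an even difference (zip of the list with its own tail, short-circuiting all()), instead of counting evens and odds and comparing each counter against len(a).
import Mathlib
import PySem

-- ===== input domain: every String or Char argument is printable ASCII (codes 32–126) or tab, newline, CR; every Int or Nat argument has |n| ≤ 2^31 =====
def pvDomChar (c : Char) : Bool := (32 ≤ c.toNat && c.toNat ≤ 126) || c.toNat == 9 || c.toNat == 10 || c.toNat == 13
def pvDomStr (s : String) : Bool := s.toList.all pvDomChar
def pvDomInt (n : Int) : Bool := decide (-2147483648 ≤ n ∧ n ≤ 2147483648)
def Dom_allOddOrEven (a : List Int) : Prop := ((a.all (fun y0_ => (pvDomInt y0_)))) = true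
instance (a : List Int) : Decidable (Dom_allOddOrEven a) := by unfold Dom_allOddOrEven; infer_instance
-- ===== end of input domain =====

-- B checks every adjacent pair has an even difference (zip with the tail),
-- instead of A's two counters each compared against len(a); same cost, more idiomatic.

-- ===== PORT A =====
def allOddOrEven (a : List Int) : Bool :=
  let st := a.foldl
    (fun (p : Int × Int) number =>
      if PySem.Int.mod number 2 == 0 then (p.1 + 1, p.2) else (p.1, p.2 + 1))
    (0, 0)
  if st.1 == (a.length : Int) then true
  else if st.2 == (a.length : Int) then true
  else false

-- ===== PORT B =====
def allOddOrEven_alt (a : List Int) : Bool :=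
  (a.zip (PySem.List.slice a (some 1) none)).all
    (fun p => PySem.Int.mod (p.1 - p.2) 2 == 0)

-- ===== PRECONDITION & SPEC =====
def Spec_allOddOrEven (a : List Int) (out : Bool) : Prop := out = allOddOrEven_alt a
instance (a : List Int) (out : Bool) : Decidable (Spec_allOddOrEven a out) := by unfold Spec_allOddOrEven; infer_instance

-- ===== CLAIM (what is proved, stated in full; the proofs are below) =====
def Claim_equal_allOddOrEven : Prop := ∀ (a : List Int), Dom_allOddOrEven a → Spec_allOddOrEven a (allOddOrEven a)

-- ===== LEMMAS AND PROOFS =====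

def pvPar (n : Int) : Int := PySem.Int.mod n 2

theorem pvPar_cases (n : Int) : pvPar n = 0 ∨ pvPar n = 1 := by
  have h : PySem.Int.mod n 2 = n % 2 := PySem.Int.mod_eq_emod_of_pos (by norm_num)
  unfold pvPar; rw [h]; omega

theorem pvPar_diff (x y : Int) :
    (PySem.Int.mod (x - y) 2 == 0) = true ↔ pvPar x = pvPar y := by
  have h1 : PySem.Int.mod (x - y) 2 = (x - y) % 2 := PySem.Int.mod_eq_emod_of_pos (by norm_num)
  have h2 : PySem.Int.mod x 2 = x % 2 := PySem.Int.mod_eq_emod_of_pos (by norm_num)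
  have h3 : PySem.Int.mod y 2 = y % 2 := PySem.Int.mod_eq_emod_of_pos (by norm_num)
  unfold pvPar
  rw [h1, h2, h3, beq_iff_eq]
  omega

-- A's fold counts evens and odds on top of the starting counters.
theorem foldA_counts (a : List Int) (e o : Int) :
    a.foldl (fun (p : Int × Int) number =>
      if PySem.Int.mod number 2 == 0 then (p.1 + 1, p.2) else (p.1, p.2 + 1)) (e, o)
    = (e + a.countP (fun n => pvPar n == 0), o + a.countP (fun n => !(pvPar n == 0))) := by
  induction a generalizing e o with
  | nil => simp
  | cons x xs ih =>
    cases hc : (PySem.Int.mod x 2 == 0) with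
    | true =>
      have hp : (pvPar x == 0) = true := by simpa [pvPar] using hc
      simp only [List.foldl_cons, hc, if_true, List.countP_cons, hp, ih]
      simp; ring
    | false =>
      have hp : (pvPar x == 0) = false := by simpa [pvPar] using hc
      simp only [List.foldl_cons, hc, Bool.false_eq_true, if_false, List.countP_cons, hp,
        Bool.not_false, ih]
      simp; ring

theorem charA (a : List Int) :
    allOddOrEven a = true ↔
      ((∀ x ∈ a, pvPar x = 0) ∨ (∀ x ∈ a, pvPar x = 1)) := by
  unfold allOddOrEven
  rw [foldA_counts]
  have hle0 := List.countP_le_length (p := fun n => pvPar n == 0) (l := a)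
  have hle1 := List.countP_le_length (p := fun n => !(pvPar n == 0)) (l := a)
  simp only [beq_iff_eq]
  constructor
  · intro h
    split_ifs at h with h0 h1
    · left
      have : a.countP (fun n => pvPar n == 0) = a.length := by omega
      intro x hx
      have := (List.countP_eq_length).mp this x hx
      simpa using this
    · right
      have : a.countP (fun n => !(pvPar n == 0)) = a.length := by omega
      intro x hx
      have := (List.countP_eq_length).mp this x hx
      rcases pvPar_cases x with hc | hc
      · simp [hc] at this
      · exact hc
  · intro h
    rcases h with h | h
    · have : a.countP (fun n => pvPar n == 0) = a.length :=
        (List.countP_eq_length).mpr (fun x hx => by simp [h x hx])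
      rw [if_pos (by omega)]
    · have : a.countP (fun n => !(pvPar n == 0)) = a.length :=
        (List.countP_eq_length).mpr (fun x hx => by simp [h x hx])
      by_cases h0 : (0 : Int) + a.countP (fun n => pvPar n == 0) = (a.length : Int)
      · rw [if_pos h0]
      · rw [if_neg h0, if_pos (by omega)]

-- B's adjacent-pairs check holds iff every element has the parity of the head.
theorem charB_head (a : List Int) :
    allOddOrEven_alt a = true ↔
      (∀ h t, a = h :: t → ∀ x ∈ t, pvPar x = pvPar h) := by
  unfold allOddOrEven_alt
  rw [PySem.List.slice_from_one]
  induction a with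
  | nil => simp
  | cons x xs ih =>
    cases xs with
    | nil => simp
    | cons y ys =>
      simp only [List.tail_cons, List.zip_cons_cons, List.all_cons, Bool.and_eq_true,
        pvPar_diff]
      rw [show ((y :: ys).zip ys) = ((y :: ys).zip (y :: ys).tail) by rfl] at *
      rw [ih]
      constructor
      · rintro ⟨hxy, hrest⟩ h t ht z hz
        injection ht with h1 h2; subst h1; subst h2
        rcases List.mem_cons.mp hz with rfl | hz'
        · exact hxy.symm
        · rw [hrest y ys rfl z hz', ← hxy]
      · intro h
        constructor
        · exact (h x (y :: ys) rfl y (by simp)).symm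
        · intro h' t' ht' z hz
          injection ht' with h1 h2; subst h1; subst h2
          rw [h x (y :: ys) rfl z (by simp [hz]), h x (y :: ys) rfl y (by simp)]

theorem charB (a : List Int) :
    allOddOrEven_alt a = true ↔
      ((∀ x ∈ a, pvPar x = 0) ∨ (∀ x ∈ a, pvPar x = 1)) := by
  rw [charB_head]
  cases a with
  | nil => simp
  | cons h t =>
    constructor
    · intro hh
      have hall : ∀ x ∈ h :: t, pvPar x = pvPar h := by
        intro x hx
        rcases List.mem_cons.mp hx with rfl | hx'
        · rfl
        · exact hh h t rfl x hx'
      rcases pvPar_cases h with hc | hc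
      · left; intro x hx; rw [hall x hx, hc]
      · right; intro x hx; rw [hall x hx, hc]
    · intro hor h' t' ht' x hx
      injection ht' with h1 h2; subst h1; subst h2
      rcases hor with hall | hall
      · rw [hall x (by simp [hx]), hall h (by simp)]
      · rw [hall x (by simp [hx]), hall h (by simp)]

-- ===== VERDICT (by name: the statement is the Claim_ definition above) =====
theorem allOddOrEven_spec : Claim_equal_allOddOrEven := by
  intro a _
  unfold Spec_allOddOrEven
  have := (charA a).trans (charB a).symm
  cases hA : allOddOrEven a <;> cases hB : allOddOrEven_alt a <;> simp_all
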